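-- pv_equiv track=rewrite | github.com/J4GitHub1/Adrian-s-PDF-Manipulator | AdriansPDFManipulator.py | expand_and_merge
-- ===== SOURCE A (Python) =====
-- def expand_and_merge(matching_pages, buffer_size, total_pages):
--     """Expand each match by ±buffer and return a sorted list of page indices."""
--     if not matching_pages:
--         return []
--
--     expanded = set()
--     for p in matching_pages:
--         for offset in range(-buffer_size, buffer_size + 1):
--             candidate = p + offset
--             if 0 <= candidate < total_pages:
--                 expanded.add(candidate)
--
--     return sorted(expanded)
-- ===== SOURCE B (Python) =====
-- def expand_and_merge(matching_pages, buffer_size, total_pages):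
--     """Sort matches, merge overlapping/adjacent +/-buffer intervals, then emit each clamped range once."""
--     if not matching_pages or buffer_size < 0:
--         return []
--     pages = sorted(matching_pages)
--     result = []
--     lo = pages[0] - buffer_size
--     hi = pages[0] + buffer_size
--     for p in pages[1:]:
--         if p - buffer_size <= hi + 1:
--             hi = max(hi, p + buffer_size)
--         else:
--             result.extend(range(max(lo, 0), min(hi, total_pages - 1) + 1))
--             lo, hi = p - buffer_size, p + buffer_size
--     result.extend(range(max(lo, 0), min(hi, total_pages - 1) + 1))
--     return result
-- ===== Notes on version B (the rewrite author's own statement) =====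
-- stated objective: faster
-- what changed: Instead of inserting every page of every +/-buffer window into a set and sorting it, B sorts the matches once, merges overlapping/adjacent [p-buffer, p+buffer] intervals in one pass, and emits each clamped interval as a range, so no per-page set work and no final sort of the output.
import Mathlib
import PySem

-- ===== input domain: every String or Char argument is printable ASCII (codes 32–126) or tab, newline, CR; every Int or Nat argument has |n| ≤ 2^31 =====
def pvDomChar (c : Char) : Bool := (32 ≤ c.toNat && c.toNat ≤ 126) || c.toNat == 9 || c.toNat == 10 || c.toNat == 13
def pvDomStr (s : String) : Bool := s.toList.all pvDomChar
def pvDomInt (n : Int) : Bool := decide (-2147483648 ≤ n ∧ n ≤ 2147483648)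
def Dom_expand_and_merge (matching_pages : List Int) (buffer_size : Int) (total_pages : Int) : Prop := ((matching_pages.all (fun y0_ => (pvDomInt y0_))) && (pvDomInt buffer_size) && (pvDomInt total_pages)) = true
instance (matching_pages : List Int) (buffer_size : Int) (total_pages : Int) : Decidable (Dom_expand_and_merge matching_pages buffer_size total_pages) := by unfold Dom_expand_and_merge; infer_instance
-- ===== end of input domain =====

-- B merges sorted ±buffer intervals in one pass instead of inserting every window page into a set and sorting it.

-- ===== PORT A =====
def expand_and_merge (matching_pages : List Int) (buffer_size : Int) (total_pages : Int) : List Int :=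
  if matching_pages = [] then []
  else
    let expanded : PySem.Set Int :=
      matching_pages.foldl (fun s p =>
        (PySem.List.pyRange (-buffer_size) (buffer_size + 1) 1).foldl (fun s2 off =>
          let candidate := p + off
          if 0 ≤ candidate ∧ candidate < total_pages then PySem.Set.add s2 candidate else s2) s)
        PySem.Set.empty
    PySem.List.sorted expanded (fun x => x) false

-- ===== PORT B =====
-- result.extend(range(max(lo, 0), min(hi, total_pages - 1) + 1))
def pvEmit (lo hi total_pages : Int) : List Int :=
  PySem.List.pyRange (max lo 0) (min hi (total_pages - 1) + 1) 1

-- the loop over pages[1:], carrying the current open interval [lo, hi]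
def pvMergeGo (b T : Int) : List Int → Int → Int → List Int
  | [], lo, hi => pvEmit lo hi T
  | p :: rest, lo, hi =>
    if p - b ≤ hi + 1 then pvMergeGo b T rest lo (max hi (p + b))
    else pvEmit lo hi T ++ pvMergeGo b T rest (p - b) (p + b)

def expand_and_merge_alt (matching_pages : List Int) (buffer_size : Int) (total_pages : Int) : List Int :=
  if matching_pages = [] ∨ buffer_size < 0 then []
  else
    match PySem.List.sorted matching_pages (fun x => x) false with
    | [] => []
    | p :: rest => pvMergeGo buffer_size total_pages rest (p - buffer_size) (p + buffer_size)

-- ===== PRECONDITION & SPEC =====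
def Spec_expand_and_merge (matching_pages : List Int) (buffer_size : Int) (total_pages : Int) (out : List Int) : Prop := out = expand_and_merge_alt matching_pages buffer_size total_pages
instance (matching_pages : List Int) (buffer_size : Int) (total_pages : Int) (out : List Int) : Decidable (Spec_expand_and_merge matching_pages buffer_size total_pages out) := by unfold Spec_expand_and_merge; infer_instance

-- ===== CLAIM (what is proved, stated in full; the proofs are below) =====
def Claim_equal_expand_and_merge : Prop := ∀ (matching_pages : List Int) (buffer_size : Int) (total_pages : Int), Dom_expand_and_merge matching_pages buffer_size total_pages → Spec_expand_and_merge matching_pages buffer_size total_pages (expand_and_merge matching_pages buffer_size total_pages)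

-- ===== LEMMAS AND PROOFS =====

-- A's inner loop over offsets: membership
theorem pv_mem_inner (T p : Int) (offs : List Int) (s : List Int) (x : Int) :
    x ∈ offs.foldl (fun s2 off =>
        if 0 ≤ p + off ∧ p + off < T then PySem.Set.add s2 (p + off) else s2) s ↔
      x ∈ s ∨ ∃ off ∈ offs, x = p + off ∧ 0 ≤ x ∧ x < T := by
  induction offs generalizing s with
  | nil => simp
  | cons o os ih =>
    simp only [List.foldl_cons, ih, List.mem_cons]
    split_ifs with h
    · simp only [PySem.Set.mem_add]
      constructor
      · rintro (⟨hs | he⟩ | h2)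
        · exact Or.inl hs
        · exact Or.inr ⟨o, Or.inl rfl, by omega⟩
        · obtain ⟨off, hm, h3⟩ := h2; exact Or.inr ⟨off, Or.inr hm, h3⟩
      · rintro (hs | ⟨off, (rfl | hm), h3⟩)
        · exact Or.inl (Or.inl hs)
        · exact Or.inl (Or.inr (by omega))
        · exact Or.inr ⟨off, hm, h3⟩
    · constructor
      · rintro (hs | ⟨off, hm, h3⟩)
        · exact Or.inl hs
        · exact Or.inr ⟨off, Or.inr hm, h3⟩
      · rintro (hs | ⟨off, (rfl | hm), h3⟩)
        · exact Or.inl hs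
        · exact absurd (by omega) h
        · exact Or.inr ⟨off, hm, h3⟩

-- A's inner loop: nodup is preserved
theorem pv_nodup_inner (T p : Int) (offs : List Int) (s : List Int) (hs : s.Nodup) :
    (offs.foldl (fun s2 off =>
        if 0 ≤ p + off ∧ p + off < T then PySem.Set.add s2 (p + off) else s2) s).Nodup := by
  induction offs generalizing s with
  | nil => exact hs
  | cons o os ih =>
    simp only [List.foldl_cons]
    split_ifs with h
    · exact ih _ (PySem.Set.nodup_add _ _ hs)
    · exact ih _ hs

-- A's outer loop: membership
theorem pv_mem_outer (b T : Int) (mp : List Int) (s : List Int) (x : Int) :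
    x ∈ mp.foldl (fun s p =>
        (PySem.List.pyRange (-b) (b + 1) 1).foldl (fun s2 off =>
          if 0 ≤ p + off ∧ p + off < T then PySem.Set.add s2 (p + off) else s2) s) s ↔
      x ∈ s ∨ ∃ p ∈ mp, p - b ≤ x ∧ x ≤ p + b ∧ 0 ≤ x ∧ x < T := by
  induction mp generalizing s with
  | nil => simp
  | cons p ps ih =>
    simp only [List.foldl_cons, ih, pv_mem_inner, List.mem_cons]
    constructor
    · rintro (⟨hs | ⟨off, hm, h3⟩⟩ | ⟨q, hm, h3⟩)
      · exact Or.inl hs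
      · rw [PySem.List.mem_pyRange_one] at hm
        exact Or.inr ⟨p, Or.inl rfl, by omega⟩
      · exact Or.inr ⟨q, Or.inr hm, h3⟩
    · rintro (hs | ⟨q, (rfl | hm), h3⟩)
      · exact Or.inl (Or.inl hs)
      · refine Or.inl (Or.inr ⟨x - q, ?_, by omega⟩)
        rw [PySem.List.mem_pyRange_one]; omega
      · exact Or.inr ⟨q, hm, h3⟩

-- A's outer loop: nodup is preserved
theorem pv_nodup_outer (b T : Int) (mp : List Int) (s : List Int) (hs : s.Nodup) :
    (mp.foldl (fun s p =>
        (PySem.List.pyRange (-b) (b + 1) 1).foldl (fun s2 off =>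
          if 0 ≤ p + off ∧ p + off < T then PySem.Set.add s2 (p + off) else s2) s) s).Nodup := by
  induction mp generalizing s with
  | nil => exact hs
  | cons p ps ih => exact ih _ (pv_nodup_inner T p _ s hs)

-- characterisation of A's output membership
theorem pv_memA (mp : List Int) (b T x : Int) :
    x ∈ expand_and_merge mp b T ↔
      (∃ p ∈ mp, p - b ≤ x ∧ x ≤ p + b) ∧ 0 ≤ x ∧ x < T := by
  unfold expand_and_merge
  split_ifs with h
  · subst h; simp
  · rw [PySem.List.mem_sorted, pv_mem_outer]
    simp only [PySem.Set.empty, List.not_mem_nil, false_or]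
    constructor
    · rintro ⟨p, hm, h3⟩; exact ⟨⟨p, hm, h3.1, h3.2.1⟩, h3.2.2⟩
    · rintro ⟨⟨p, hm, h3⟩, h4⟩; exact ⟨p, hm, by omega⟩

-- A's output is strictly increasing
theorem pv_pairwiseA (mp : List Int) (b T : Int) :
    (expand_and_merge mp b T).Pairwise (· < ·) := by
  unfold expand_and_merge
  split_ifs with h
  · simp
  · have hle := PySem.List.sorted_pairwise
      (xs := (mp.foldl (fun s p =>
        (PySem.List.pyRange (-b) (b + 1) 1).foldl (fun s2 off =>
          let candidate := p + off
          if 0 ≤ candidate ∧ candidate < T then PySem.Set.add s2 candidate else s2) s)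
        PySem.Set.empty)) (key := fun x => x)
    have hnd : (PySem.List.sorted (mp.foldl (fun s p =>
        (PySem.List.pyRange (-b) (b + 1) 1).foldl (fun s2 off =>
          let candidate := p + off
          if 0 ≤ candidate ∧ candidate < T then PySem.Set.add s2 candidate else s2) s)
        PySem.Set.empty) (fun x => x) false).Nodup :=
      (PySem.List.sorted_perm _ _ _).nodup_iff.2 (pv_nodup_outer b T mp _ List.nodup_nil)
    exact (hle.and hnd).imp (fun hab => lt_of_le_of_ne hab.1 hab.2)

-- B's emitted block: membership
theorem pv_mem_emit (lo hi T x : Int) :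
    x ∈ pvEmit lo hi T ↔ lo ≤ x ∧ x ≤ hi ∧ 0 ≤ x ∧ x < T := by
  rw [pvEmit, PySem.List.mem_pyRange_one]; omega

-- B's merge loop: membership, under the loop invariants
theorem pv_mem_mergeGo (b T x : Int) (hb : 0 ≤ b) :
    ∀ (l : List Int) (lo hi : Int), lo ≤ hi → (∀ q ∈ l, lo ≤ q - b) → l.Pairwise (· ≤ ·) →
    (x ∈ pvMergeGo b T l lo hi ↔
      ((lo ≤ x ∧ x ≤ hi) ∨ ∃ q ∈ l, q - b ≤ x ∧ x ≤ q + b) ∧ 0 ≤ x ∧ x < T) := by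
  intro l
  induction l with
  | nil => intro lo hi _ _ _; simp [pvMergeGo, pv_mem_emit]; omega
  | cons p rest ih =>
    intro lo hi hlohi hinv hpw
    rw [pvMergeGo]
    have hplo : lo ≤ p - b := hinv p (List.mem_cons_self ..)
    split_ifs with hmerge
    · rw [ih lo (max hi (p + b)) (by omega)
        (fun q hq => hinv q (List.mem_cons_of_mem _ hq)) hpw.of_cons]
      constructor
      · rintro ⟨(h1 | ⟨q, hm, h3⟩), h4⟩
        · rcases le_or_gt x hi with h5 | h5
          · exact ⟨Or.inl ⟨h1.1, h5⟩, h4⟩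
          · exact ⟨Or.inr ⟨p, List.mem_cons_self .., by omega⟩, h4⟩
        · exact ⟨Or.inr ⟨q, List.mem_cons_of_mem _ hm, h3⟩, h4⟩
      · rintro ⟨(h1 | ⟨q, hm, h3⟩), h4⟩
        · exact ⟨Or.inl ⟨h1.1, by omega⟩, h4⟩
        · rcases List.mem_cons.1 hm with rfl | hm'
          · exact ⟨Or.inl ⟨by omega, by omega⟩, h4⟩
          · exact ⟨Or.inr ⟨q, hm', h3⟩, h4⟩
    · rw [List.mem_append, pv_mem_emit,
        ih (p - b) (p + b) (by omega)
          (fun q hq => by have := (List.pairwise_cons.1 hpw).1 q hq; omega)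
          hpw.of_cons]
      constructor
      · rintro (⟨h1, h2, h4⟩ | ⟨(h1 | ⟨q, hm, h3⟩), h4⟩)
        · exact ⟨Or.inl ⟨h1, h2⟩, h4⟩
        · exact ⟨Or.inr ⟨p, List.mem_cons_self .., h1⟩, h4⟩
        · exact ⟨Or.inr ⟨q, List.mem_cons_of_mem _ hm, h3⟩, h4⟩
      · rintro ⟨(h1 | ⟨q, hm, h3⟩), h4⟩
        · exact Or.inl ⟨h1.1, h1.2, h4⟩
        · rcases List.mem_cons.1 hm with rfl | hm'
          · exact Or.inr ⟨Or.inl h3, h4⟩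
          · exact Or.inr ⟨Or.inr ⟨q, hm', h3⟩, h4⟩

-- B's merge loop: the output is strictly increasing, under the loop invariants
theorem pv_pairwise_mergeGo (b T : Int) (hb : 0 ≤ b) :
    ∀ (l : List Int) (lo hi : Int), lo ≤ hi → (∀ q ∈ l, lo ≤ q - b) → l.Pairwise (· ≤ ·) →
    (pvMergeGo b T l lo hi).Pairwise (· < ·) := by
  intro l
  induction l with
  | nil =>
    intro lo hi _ _ _
    exact PySem.List.pairwise_lt_pyRange_one _ _
  | cons p rest ih =>
    intro lo hi hlohi hinv hpw
    rw [pvMergeGo]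
    have hplo : lo ≤ p - b := hinv p (List.mem_cons_self ..)
    split_ifs with hmerge
    · exact ih lo (max hi (p + b)) (by omega)
        (fun q hq => hinv q (List.mem_cons_of_mem _ hq)) hpw.of_cons
    · rw [List.pairwise_append]
      have hinv' : ∀ q ∈ rest, p - b ≤ q - b :=
        fun q hq => by have := (List.pairwise_cons.1 hpw).1 q hq; omega
      refine ⟨PySem.List.pairwise_lt_pyRange_one _ _,
        ih (p - b) (p + b) (by omega) hinv' hpw.of_cons, ?_⟩
      intro a ha c hc
      rw [pv_mem_emit] at ha
      have hc' := (pv_mem_mergeGo b T c hb rest (p - b) (p + b) (by omega) hinv'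
        hpw.of_cons).1 hc
      rcases hc'.1 with h1 | ⟨q, hm, h3⟩
      · omega
      · have := (List.pairwise_cons.1 hpw).1 q hm; omega

-- characterisation of B's output membership
theorem pv_memB (mp : List Int) (b T x : Int) :
    x ∈ expand_and_merge_alt mp b T ↔
      (∃ p ∈ mp, p - b ≤ x ∧ x ≤ p + b) ∧ 0 ≤ x ∧ x < T := by
  unfold expand_and_merge_alt
  split_ifs with h
  · rcases h with rfl | hb
    · simp
    · simp only [List.not_mem_nil, false_iff]
      rintro ⟨⟨p, _, h1, h2⟩, _⟩; omega
  · rw [not_or, not_lt] at h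
    obtain ⟨hne, hb⟩ := h
    rcases hs : PySem.List.sorted mp (fun x => x) false with _ | ⟨p, rest⟩
    · exact absurd ((PySem.List.sorted_eq_nil_iff _ _ _).1 hs) hne
    · have hmem : ∀ y, y ∈ p :: rest ↔ y ∈ mp := by
        intro y; rw [← hs, PySem.List.mem_sorted]
      have hpw : (p :: rest).Pairwise (· ≤ ·) := by
        have := PySem.List.sorted_pairwise (xs := mp) (key := fun x => x)
        rwa [hs] at this
      have hhead : ∀ q ∈ rest, p ≤ q := (List.pairwise_cons.1 hpw).1
      rw [pv_mem_mergeGo b T x (by omega) rest (p - b) (p + b) (by omega)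
        (fun q hq => by have := hhead q hq; omega) hpw.of_cons]
      constructor
      · rintro ⟨(h1 | ⟨q, hm, h3⟩), h4⟩
        · exact ⟨⟨p, (hmem p).1 (List.mem_cons_self ..), h1⟩, h4⟩
        · exact ⟨⟨q, (hmem q).1 (List.mem_cons_of_mem _ hm), h3⟩, h4⟩
      · rintro ⟨⟨q, hm, h3⟩, h4⟩
        rcases List.mem_cons.1 ((hmem q).2 hm) with rfl | hm'
        · exact ⟨Or.inl h3, h4⟩
        · exact ⟨Or.inr ⟨q, hm', h3⟩, h4⟩

-- B's output is strictly increasing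
theorem pv_pairwiseB (mp : List Int) (b T : Int) :
    (expand_and_merge_alt mp b T).Pairwise (· < ·) := by
  unfold expand_and_merge_alt
  split_ifs with h
  · simp
  · rw [not_or, not_lt] at h
    obtain ⟨hne, hb⟩ := h
    rcases hs : PySem.List.sorted mp (fun x => x) false with _ | ⟨p, rest⟩
    · simp
    · have hpw : (p :: rest).Pairwise (· ≤ ·) := by
        have := PySem.List.sorted_pairwise (xs := mp) (key := fun x => x)
        rwa [hs] at this
      have hhead : ∀ q ∈ rest, p ≤ q := (List.pairwise_cons.1 hpw).1
      exact pv_pairwise_mergeGo b T (by omega) rest (p - b) (p + b) (by omega)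
        (fun q hq => by have := hhead q hq; omega) hpw.of_cons

-- two strictly increasing lists with the same members are equal
theorem pv_eq_of_pairwise_lt (l1 l2 : List Int) (h1 : l1.Pairwise (· < ·))
    (h2 : l2.Pairwise (· < ·)) (h : ∀ x, x ∈ l1 ↔ x ∈ l2) : l1 = l2 := by
  have hn1 : l1.Nodup := h1.imp ne_of_lt
  have hn2 : l2.Nodup := h2.imp ne_of_lt
  exact ((List.perm_ext_iff_of_nodup hn1 hn2).2 h).eq_of_pairwise
    (fun a b _ _ hab hba => absurd hab (not_lt.2 hba.le)) h1 h2

-- ===== VERDICT (by name: the statement is the Claim_ definition above) =====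
theorem expand_and_merge_spec : Claim_equal_expand_and_merge := by
  intro mp b T _
  unfold Spec_expand_and_merge
  exact pv_eq_of_pairwise_lt _ _ (pv_pairwiseA mp b T) (pv_pairwiseB mp b T)
    (fun x => (pv_memA mp b T x).trans (pv_memB mp b T x).symm)
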